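-- pv_equiv track=rewrite | github.com/mrcork/BIO | 2019/Q3.py | check_valid_block
-- ===== SOURCE A (Python) =====
-- def check_valid_block(block):
--     '''first finds the first increasing sequence of length 2
--     if we find a smaller increasing sequence we update the sequence
--     if we find an increasing sequence of length 3 return FALSE'''
--     inc_seq = [block[0]] #increasing sequence
--     min_val = block[0]
--     for letter in block:
--         if len(inc_seq) == 1 and letter < inc_seq[0]:
--             inc_seq[0] = min_val = letter
--         elif len(inc_seq) == 1 and letter > inc_seq[0]:
--             inc_seq.append(letter)
--         elif len(inc_seq) == 2 and letter > inc_seq[1]: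
--             return False
--         elif len(inc_seq) == 2 and inc_seq[0] < letter < inc_seq[1]:
--             inc_seq[1] = letter
--         elif letter < min_val:
--             min_val = letter
--         elif letter > min_val:
--             inc_seq = [min_val,letter]
--     return True
-- ===== SOURCE B (Python) =====
-- import bisect
--
-- def check_valid_block(block):
--     # Patience-sorting strict-LIS check: tails[i] = smallest possible tail of
--     # an increasing subsequence of length i+1; valid iff LIS length < 3.
--     tails = [block[0]]
--     for x in block[1:]:
--         i = bisect.bisect_left(tails, x)
--         if i == len(tails):
--             tails.append(x)
--         else:
--             tails[i] = x
--     return len(tails) < 3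
-- ===== Notes on version B (the rewrite author's own statement) =====
-- stated objective: alternative
-- what changed: Replaced A's ad-hoc min/pair state machine with a patience-sorting LIS computation (sorted tails array updated via binary search), returning whether the strict LIS length is below 3.
import Mathlib
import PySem

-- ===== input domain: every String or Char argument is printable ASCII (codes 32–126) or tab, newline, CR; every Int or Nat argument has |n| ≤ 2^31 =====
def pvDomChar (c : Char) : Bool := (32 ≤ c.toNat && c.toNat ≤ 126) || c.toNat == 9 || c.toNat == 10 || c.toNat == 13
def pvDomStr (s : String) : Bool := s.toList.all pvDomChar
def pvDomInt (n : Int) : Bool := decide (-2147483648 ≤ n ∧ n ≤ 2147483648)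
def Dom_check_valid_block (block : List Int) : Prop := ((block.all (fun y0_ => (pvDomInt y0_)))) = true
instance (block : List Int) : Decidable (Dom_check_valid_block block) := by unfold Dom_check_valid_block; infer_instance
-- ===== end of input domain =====

-- B replaces A's ad-hoc min/pair state machine with a patience-sorting strict-LIS
-- computation (sorted tails updated via bisect_left); alternative algorithm, not faster.
-- Both raise IndexError on the empty list (block[0]); Pre_ excludes it.

-- ===== PORT A =====
-- A's loop, one step per list element; inc_seq is the Python list inc_seq, min_val is min_val.
def aLoop : List Int → List Int → Int → Bool
  | [], _, _ => true
  | letter :: rest, inc_seq, min_val =>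
    if inc_seq.length = 1 ∧ letter < inc_seq.getD 0 0 then
      aLoop rest [letter] letter
    else if inc_seq.length = 1 ∧ letter > inc_seq.getD 0 0 then
      aLoop rest (inc_seq ++ [letter]) min_val
    else if inc_seq.length = 2 ∧ letter > inc_seq.getD 1 0 then
      false
    else if inc_seq.length = 2 ∧ inc_seq.getD 0 0 < letter ∧ letter < inc_seq.getD 1 0 then
      aLoop rest [inc_seq.getD 0 0, letter] min_val
    else if letter < min_val then
      aLoop rest inc_seq letter
    else if letter > min_val then
      aLoop rest [min_val, letter] min_val
    else
      aLoop rest inc_seq min_val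

def check_valid_block (block : List Int) : Bool :=
  match block with
  | [] => false  -- Python raises IndexError on block[0]; excluded by Pre_
  | b0 :: _ => aLoop block [b0] b0

-- ===== PORT B =====
-- bisect.bisect_left on the sorted tails list: index of the first element ≥ x.
def bisectLeft : List Int → Int → Nat
  | [], _ => 0
  | t :: ts, x => if t < x then bisectLeft ts x + 1 else 0

def bLoop : List Int → List Int → List Int
  | [], tails => tails
  | x :: rest, tails =>
    let i := bisectLeft tails x
    if i = tails.length then bLoop rest (tails ++ [x])
    else bLoop rest (tails.set i x)

def check_valid_block_alt (block : List Int) : Bool :=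
  match block with
  | [] => false  -- Python raises IndexError on block[0]; excluded by Pre_
  | b0 :: rest => decide ((bLoop rest [b0]).length < 3)

-- ===== PRECONDITION & SPEC =====
-- Pre_ excludes only the empty list, on which A (and B) raise IndexError at block[0].
def Pre_check_valid_block (block : List Int) : Prop := block ≠ []
instance (block : List Int) : Decidable (Pre_check_valid_block block) := by unfold Pre_check_valid_block; infer_instance
def pvWitness_check_valid_block : List Int := ([3, 1, 2])

def Spec_check_valid_block (block : List Int) (out : Bool) : Prop := out = check_valid_block_alt block
instance (block : List Int) (out : Bool) : Decidable (Spec_check_valid_block block out) := by unfold Spec_check_valid_block; infer_instance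

-- ===== CLAIM (what is proved, stated in full; the proofs are below) =====
def Claim_equal_check_valid_block : Prop := ∀ (block : List Int), Dom_check_valid_block block → Pre_check_valid_block block → Spec_check_valid_block block (check_valid_block block)

-- ===== LEMMAS AND PROOFS =====

-- bLoop never shrinks the tails list.
theorem bLoop_length_ge : ∀ (rest tails : List Int), tails.length ≤ (bLoop rest tails).length := by
  intro rest
  induction rest with
  | nil => intro tails; simp [bLoop]
  | cons x rest ih =>
    intro tails
    simp only [bLoop]
    split
    · exact le_trans (by simp) (ih (tails ++ [x]))
    · exact le_trans (by simp) (ih (tails.set (bisectLeft tails x) x))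

-- The state invariant: a 1-element A state ⟨[m], m⟩ corresponds to tails [m];
-- a 2-element A state ⟨[a,b], mn⟩ with mn ≤ a < b corresponds to tails [mn, b].
theorem key : ∀ rest : List Int,
    (∀ m : Int, aLoop rest [m] m = decide ((bLoop rest [m]).length < 3)) ∧
    (∀ mn a b : Int, mn ≤ a → a < b →
      aLoop rest [a, b] mn = decide ((bLoop rest [mn, b]).length < 3)) := by
  intro rest
  induction rest with
  | nil => constructor <;> intros <;> simp [aLoop, bLoop]
  | cons x rest ih =>
    obtain ⟨ih1, ih2⟩ := ih
    constructor
    · intro m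
      rcases lt_trichotomy x m with h | h | h
      · simpa [aLoop, bLoop, bisectLeft, h, not_lt.mpr h.le, h.ne] using ih1 x
      · subst h
        simpa [aLoop, bLoop, bisectLeft] using ih1 x
      · simpa [aLoop, bLoop, bisectLeft, h, not_lt.mpr h.le, h.ne'] using
          ih2 m m x le_rfl h
    · intro mn a b hma hab
      by_cases hbx : b < x
      · -- A returns False; B's tails reaches length 3 and never shrinks.
        have hmx : mn < x := lt_of_le_of_lt hma (lt_trans hab hbx)
        have h3 : 3 ≤ (bLoop rest [mn, b, x]).length := by
          simpa using bLoop_length_ge rest [mn, b, x]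
        have hd : ¬ (bLoop rest [mn, b, x]).length < 3 := by omega
        simp [aLoop, bLoop, bisectLeft, hmx, hbx, List.getD, hd]
      · rw [not_lt] at hbx
        rcases lt_trichotomy x mn with hx | hx | hx
        · -- x < mn : A updates min_val; B replaces tails[0].
          have h1 : ¬ a < x := not_lt.mpr (le_trans (le_of_lt hx) hma)
          simpa [aLoop, bLoop, bisectLeft, not_lt.mpr hbx, h1, not_lt.mpr hx.le, hx] using
            ih2 x a b (le_trans hx.le hma) hab
        · -- x = mn : no change on either side.
          subst hx
          have h1 : ¬ a < x := not_lt.mpr hma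
          simpa [aLoop, bLoop, bisectLeft, not_lt.mpr hbx, h1] using
            ih2 x a b hma hab
        · -- mn < x ≤ b
          by_cases hax : a < x
          · by_cases hxb : x < b
            · -- a < x < b : A sets inc_seq[1] := x; B replaces tails[1].
              have : bisectLeft [mn, b] x = 1 := by
                simp [bisectLeft, hx, not_lt.mpr hxb.le]
              simpa [aLoop, bLoop, this, not_lt.mpr hbx, hax, hxb] using
                ih2 mn a x hma hax
            · -- x = b : A rebuilds inc_seq = [min_val, x]; B replaces tails[1].
              have hxb' : x = b := le_antisymm hbx (not_lt.mp hxb)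
              subst hxb'
              have : bisectLeft [mn, x] x = 1 := by simp [bisectLeft, hx]
              simpa [aLoop, bLoop, this, hax, hxb, lt_irrefl, hx, not_lt.mpr hx.le] using
                ih2 mn mn x le_rfl hx
          · -- mn < x ≤ a : A rebuilds inc_seq = [min_val, x]; B replaces tails[1].
            rw [not_lt] at hax
            have hxb : x < b := lt_of_le_of_lt hax hab
            have : bisectLeft [mn, b] x = 1 := by
              simp [bisectLeft, hx, not_lt.mpr hxb.le]
            simpa [aLoop, bLoop, this, not_lt.mpr hbx, not_lt.mpr hax, not_lt.mpr hx.le,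
              not_lt.mpr (le_trans hx.le hax), hx] using
              ih2 mn mn x le_rfl hx

-- ===== VERDICT (by name: the statement is the Claim_ definition above) =====
theorem check_valid_block_spec : Claim_equal_check_valid_block := by
  intro block _ hpre
  match block with
  | [] => exact absurd rfl hpre
  | b0 :: rest =>
    show check_valid_block (b0 :: rest) = check_valid_block_alt (b0 :: rest)
    simp only [check_valid_block, check_valid_block_alt, aLoop, lt_irrefl]
    simpa using (key rest).1 b0
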